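-- pv_equiv track=rewrite | github.com/gridvisi/Python_workspace | Zero 2 Hero Class/Dict_startup/6 kyu [Minecraft Series #1] Steve wants to build a beacon pyramid.py | blocks_to_collect
-- ===== SOURCE A (Python) =====
-- def blocks_to_collect(level):
--     answer = {
--         'total': sum([(i + 3 + i) ** 2 for i in range(level)]),
--         'gold': sum([(i + 3 + i) ** 2 for i in range(0, level, 4)]),
--         'diamond': sum([(i + 3 + i) ** 2 for i in range(1, level, 4)]),
--         'emerald': sum([(i + 3 + i) ** 2 for i in range(2, level, 4)]),
--         'iron': sum([(i + 3 + i) ** 2 for i in range(3, level, 4)]),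
--     }
--
--     return answer
-- ===== SOURCE B (Python) =====
-- def blocks_to_collect(level):
--     # O(1): closed-form polynomial formulas for each strided sum of (2i+3)^2.
--     def stride(r):
--         n = max(0, (level - r + 3) // 4)
--         c = 2 * r + 3
--         return 32 * n * (n - 1) * (2 * n - 1) // 3 + 8 * c * n * (n - 1) + c * c * n
--     L = max(0, level)
--     total = 2 * L * (L + 1) * (2 * L + 1) // 3 + 2 * L * (L + 1) + L
--     return {'total': total, 'gold': stride(0), 'diamond': stride(1),
--             'emerald': stride(2), 'iron': stride(3)}
-- ===== Notes on version B (the rewrite author's own statement) =====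
-- stated objective: faster
-- what changed: Replaced the five O(level) summation loops over range() with closed-form cubic polynomial formulas (Faulhaber) for each strided sum of (2i+3)^2, evaluated in O(1).
import Mathlib
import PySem

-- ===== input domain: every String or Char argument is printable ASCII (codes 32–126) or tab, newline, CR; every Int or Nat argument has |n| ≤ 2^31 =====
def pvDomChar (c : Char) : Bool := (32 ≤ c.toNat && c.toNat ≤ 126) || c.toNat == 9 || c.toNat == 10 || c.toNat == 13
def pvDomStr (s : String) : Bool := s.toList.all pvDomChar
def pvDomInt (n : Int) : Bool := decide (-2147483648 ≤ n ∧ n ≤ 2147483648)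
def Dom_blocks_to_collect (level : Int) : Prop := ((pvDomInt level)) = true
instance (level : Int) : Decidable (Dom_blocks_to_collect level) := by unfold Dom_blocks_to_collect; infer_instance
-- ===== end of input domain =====

-- ===== PORT A =====
-- B replaces A's O(level) summation loops with closed-form polynomial formulas (O(1)).
-- A-side helper: sum([(i + 3 + i) ** 2 for i in range(a, level, s)])
def pySumLayers (a level s : Int) : Int :=
  (PySem.List.pyRange a level s).foldl (fun acc i => acc + (i + 3 + i) ^ 2) 0

def blocks_to_collect (level : Int) : List (String × Int) :=
  [("total", pySumLayers 0 level 1),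
   ("gold", pySumLayers 0 level 4),
   ("diamond", pySumLayers 1 level 4),
   ("emerald", pySumLayers 2 level 4),
   ("iron", pySumLayers 3 level 4)]

-- ===== PORT B =====
-- B-side helper: closed form for sum((2*(r+4j)+3)**2 for j in range(n)), n = max(0, (level-r+3)//4)
def altStride (level r : Int) : Int :=
  let n := max 0 (PySem.Int.floordiv (level - r + 3) 4)
  let c := 2 * r + 3
  PySem.Int.floordiv (32 * n * (n - 1) * (2 * n - 1)) 3 + 8 * c * n * (n - 1) + c * c * n

def blocks_to_collect_alt (level : Int) : List (String × Int) :=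
  let L := max 0 level
  [("total", PySem.Int.floordiv (2 * L * (L + 1) * (2 * L + 1)) 3 + 2 * L * (L + 1) + L),
   ("gold", altStride level 0),
   ("diamond", altStride level 1),
   ("emerald", altStride level 2),
   ("iron", altStride level 3)]

-- ===== PRECONDITION & SPEC =====
def Spec_blocks_to_collect (level : Int) (out : List (String × Int)) : Prop := out = blocks_to_collect_alt level
instance (level : Int) (out : List (String × Int)) : Decidable (Spec_blocks_to_collect level out) := by unfold Spec_blocks_to_collect; infer_instance

-- ===== CLAIM (what is proved, stated in full; the proofs are below) =====
def Claim_equal_blocks_to_collect : Prop := ∀ (level : Int), Dom_blocks_to_collect level → Spec_blocks_to_collect level (blocks_to_collect level)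

-- ===== LEMMAS AND PROOFS =====

-- 6 * Σ_{k<n} (s*k + c)^2 as a polynomial in n (over Int), by induction on n
theorem six_mul_sum_sq (s c : Int) : ∀ n : Nat,
    6 * ((List.range n).map (fun k : Nat => (s * (k : Int) + c) ^ 2)).sum
      = s * s * n * (n - 1) * (2 * n - 1) + 6 * s * c * n * (n - 1) + 6 * c * c * n := by
  intro n
  induction n with
  | zero => simp
  | succ m ih =>
    rw [List.range_succ, List.map_append, List.sum_append]
    simp only [List.map_cons, List.map_nil, List.sum_cons, List.sum_nil]
    push_cast
    push_cast at ih
    linear_combination ih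

-- exact floor division: fdiv (3*a) 3 = a
theorem fdiv_three_mul (a : Int) : PySem.Int.floordiv (3 * a) 3 = a := by
  simp [PySem.Int.floordiv]

-- the count of range(r, level, 4) equals B's max(0, (level - r + 3) // 4)
theorem count_stride (level r : Int) (m : Nat)
    (h : m = if r < level then ((level - r + 4 - 1) / 4).toNat else 0) :
    (m : Int) = max 0 (PySem.Int.floordiv (level - r + 3) 4) := by
  simp only [PySem.Int.floordiv]
  rw [Int.fdiv_eq_ediv]
  split at h <;> simp <;> omega

-- A's running accumulation is the sum of the mapped list
theorem pySumLayers_eq_sum (a level s : Int) :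
    pySumLayers a level s = ((PySem.List.pyRange a level s).map (fun i => (i + 3 + i) ^ 2)).sum := by
  unfold pySumLayers
  rw [List.sum_eq_foldl, List.foldl_map]

-- one stride: A's summed comprehension over range(r, level, 4) equals altStride
theorem stride_eq (level r : Int) : pySumLayers r level 4 = altStride level r := by
  rw [pySumLayers_eq_sum]
  unfold altStride
  dsimp only
  rw [PySem.List.pyRange_of_pos _ _ (by norm_num : (0:Int) < 4), List.map_map]
  set m : Nat := if r < level then ((level - r + 4 - 1) / 4).toNat else 0 with hm
  have hcount : (m : Int) = max 0 (PySem.Int.floordiv (level - r + 3) 4) := count_stride level r m hm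
  rw [← hcount]
  have hterm : ((List.range m).map ((fun i => (i + 3 + i) ^ 2) ∘ fun k : Nat => r + 4 * (k : Int))).sum
      = ((List.range m).map (fun k : Nat => (8 * (k : Int) + (2 * r + 3)) ^ 2)).sum := by
    congr 1
    apply List.map_congr_left
    intro k _
    simp only [Function.comp]
    ring
  rw [hterm]
  have h6 := six_mul_sum_sq 8 (2 * r + 3) m
  set S : Int := ((List.range m).map (fun k : Nat => (8 * (k : Int) + (2 * r + 3)) ^ 2)).sum with hS
  have hdiv : (32 * (m : Int) * ((m : Int) - 1) * (2 * (m : Int) - 1))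
      = 3 * (S - 8 * (2 * r + 3) * (m : Int) * ((m : Int) - 1) - (2 * r + 3) * (2 * r + 3) * (m : Int)) := by
    have h2 : 2 * (32 * (m : Int) * ((m : Int) - 1) * (2 * (m : Int) - 1))
        = 2 * (3 * (S - 8 * (2 * r + 3) * (m : Int) * ((m : Int) - 1) - (2 * r + 3) * (2 * r + 3) * (m : Int))) := by
      linear_combination -h6
    linarith
  rw [hdiv, fdiv_three_mul]
  ring

-- total: A's summed comprehension over range(level) equals B's closed form
theorem total_eq (level : Int) :
    pySumLayers 0 level 1
      = PySem.Int.floordiv (2 * max 0 level * (max 0 level + 1) * (2 * max 0 level + 1)) 3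
        + 2 * max 0 level * (max 0 level + 1) + max 0 level := by
  rw [pySumLayers_eq_sum]
  rw [PySem.List.pyRange_of_pos _ _ (by norm_num : (0:Int) < 1), List.map_map]
  set m : Nat := if (0:Int) < level then ((level - 0 + 1 - 1) / 1).toNat else 0 with hm
  have hcount : (m : Int) = max 0 level := by split at hm <;> omega
  rw [← hcount]
  have hterm : ((List.range m).map ((fun i => (i + 3 + i) ^ 2) ∘ fun k : Nat => 0 + 1 * (k : Int))).sum
      = ((List.range m).map (fun k : Nat => (2 * (k : Int) + 3) ^ 2)).sum := by
    congr 1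
    apply List.map_congr_left
    intro k _
    simp only [Function.comp]
    ring
  rw [hterm]
  have h6 := six_mul_sum_sq 2 3 m
  set S : Int := ((List.range m).map (fun k : Nat => (2 * (k : Int) + 3) ^ 2)).sum with hS
  have hdiv : (2 * (m : Int) * ((m : Int) + 1) * (2 * (m : Int) + 1))
      = 3 * (S - 2 * (m : Int) * ((m : Int) + 1) - (m : Int)) := by
    have h2 : 2 * (2 * (m : Int) * ((m : Int) + 1) * (2 * (m : Int) + 1))
        = 2 * (3 * (S - 2 * (m : Int) * ((m : Int) + 1) - (m : Int))) := by
      linear_combination -h6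
    linarith
  rw [hdiv, fdiv_three_mul]
  ring

-- ===== VERDICT (by name: the statement is the Claim_ definition above) =====
theorem blocks_to_collect_spec : Claim_equal_blocks_to_collect := by
  intro level _
  unfold Spec_blocks_to_collect
  show blocks_to_collect level = blocks_to_collect_alt level
  unfold blocks_to_collect blocks_to_collect_alt
  rw [total_eq, stride_eq level 0, stride_eq level 1, stride_eq level 2, stride_eq level 3]
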